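-- pv_equiv track=rewrite | github.com/coolleave/algorithms | 排序-三国游戏.py | procced
-- ===== SOURCE A (Python) =====
-- def procced(inf, success, fail1, fail2):
--     # 方案的数量
--     nas = 0
--     # 兵力差  success - fail1 - fail2
--     amy = 0
--     fail_method = []
--     for sechme in inf:
--         total = sechme[success] - sechme[fail1] - sechme[fail2]
--         # 如果单个方案够，将剩下的人员作为富余兵力
--         if total > 0:
--             # 兵力积攒
--             amy += total
--             # 方案加1
--             nas += 1
--         else:
--             # 如果单个方案无法达到要求，就加入失败方案列表，让富余兵力进行平账
--             fail_method.append(total)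
--     # 对失败方案进行排序，因为是复数，要按着从大到小的顺序排列，贪心算法
--     fail_method.sort(reverse=True)
--     for method in fail_method:
--         # 富余不够再加此失败方案了 直接返回
--         if amy + method <= 0:
--             break
--             # 富余能够平账此失败方案，方案数加一
--         else:
--             amy = amy+method
--             nas += 1
--     # 如果一个满足要求的方案都没有，直接返回-1
--     if nas == 0:
--         return -1
--     return nas
-- ===== SOURCE B (Python) =====
-- def procced(inf, success, fail1, fail2):
--     # Closed-form characterization: sort all plan totals in descending order;
--     # the answer is the NUMBER of indices k whose running prefix sum is positive.
--     # Correct because the prefix sums of a descending sequence are concave, so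
--     # the positive prefix sums form exactly the initial segment A's greedy takes.
--     totals = sorted((r[success] - r[fail1] - r[fail2] for r in inf), reverse=True)
--     run = 0
--     prefixes = []
--     for t in totals:
--         run += t
--         prefixes.append(run)
--     nas = sum(1 for p in prefixes if p > 0)
--     return -1 if nas == 0 else nas
-- ===== Notes on version B (the rewrite author's own statement) =====
-- stated objective: alternative
-- what changed: Replaces A's two greedy passes (take positives, then consume sorted failures until the surplus runs out, with an early break) by a closed-form count with no break and no conditional accumulation: sort all totals descending, take all prefix sums, and count how many are positive; this equals A's answer because the prefix sums of a descending sequence are concave, so their positive part is exactly the initial segment A's greedy consumes.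
import Mathlib
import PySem

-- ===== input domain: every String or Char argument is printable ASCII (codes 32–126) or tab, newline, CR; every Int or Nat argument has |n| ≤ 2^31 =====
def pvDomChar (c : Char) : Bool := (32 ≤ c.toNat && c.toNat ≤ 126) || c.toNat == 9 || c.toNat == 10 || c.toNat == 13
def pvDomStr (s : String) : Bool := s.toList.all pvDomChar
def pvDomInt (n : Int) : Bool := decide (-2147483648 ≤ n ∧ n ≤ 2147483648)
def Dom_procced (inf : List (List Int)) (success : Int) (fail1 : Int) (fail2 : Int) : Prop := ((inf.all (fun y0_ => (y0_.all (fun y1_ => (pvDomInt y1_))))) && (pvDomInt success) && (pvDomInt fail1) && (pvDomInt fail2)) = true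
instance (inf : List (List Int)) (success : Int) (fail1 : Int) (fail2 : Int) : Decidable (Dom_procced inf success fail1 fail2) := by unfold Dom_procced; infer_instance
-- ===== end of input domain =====

-- B replaces A's two greedy passes (take positives, then consume sorted failures with a break)
-- by a closed form: sort all totals descending and COUNT the positive prefix sums (objective: alternative).

-- ===== PORT A =====
-- second loop of A: greedy over the sorted failure totals, break when amy + m <= 0
def proccedLoop2 : List Int → Int → Int → Int × Int
  | [], amy, nas => (amy, nas)
  | m :: ms, amy, nas => if amy + m ≤ 0 then (amy, nas) else proccedLoop2 ms (amy + m) (nas + 1)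

def procced (inf : List (List Int)) (success : Int) (fail1 : Int) (fail2 : Int) : Int :=
  -- state (nas, amy, fail_method)
  let st := inf.foldl (fun (st : Int × Int × List Int) sechme =>
      let total := PySem.List.pyGetD sechme success 0 - PySem.List.pyGetD sechme fail1 0 -
        PySem.List.pyGetD sechme fail2 0
      if total > 0 then (st.1 + 1, st.2.1 + total, st.2.2)
      else (st.1, st.2.1, st.2.2 ++ [total])) (0, 0, ([] : List Int))
  let fm := PySem.List.sorted st.2.2 (fun x => x) true
  let r := proccedLoop2 fm st.2.1 st.1
  if r.2 = 0 then -1 else r.2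

-- ===== PORT B =====
-- running prefix sums of the list, starting from s (B's first loop)
def prefixSums : List Int → Int → List Int
  | [], _ => []
  | t :: ts, s => (s + t) :: prefixSums ts (s + t)

def procced_alt (inf : List (List Int)) (success : Int) (fail1 : Int) (fail2 : Int) : Int :=
  let totals := PySem.List.sorted
    (inf.map (fun row => PySem.List.pyGetD row success 0 - PySem.List.pyGetD row fail1 0 -
      PySem.List.pyGetD row fail2 0)) (fun x => x) true
  let nas : Int := ((prefixSums totals 0).filter (fun p => decide (0 < p))).length
  if nas = 0 then -1 else nas

-- ===== PRECONDITION & SPEC =====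
-- A indexes every row at success, fail1, fail2; Python raises IndexError when any of them
-- is out of range for some row, so exactly those inputs are excluded.
def Pre_procced (inf : List (List Int)) (success : Int) (fail1 : Int) (fail2 : Int) : Prop :=
  ∀ row ∈ inf, PySem.Raise.InRange row.length success ∧ PySem.Raise.InRange row.length fail1 ∧
    PySem.Raise.InRange row.length fail2
instance (inf : List (List Int)) (success : Int) (fail1 : Int) (fail2 : Int) : Decidable (Pre_procced inf success fail1 fail2) := by unfold Pre_procced; infer_instance

def pvWitness_procced : List (List Int) × Int × Int × Int := ([[5, 1, 1], [2, 3, 4]], 0, 1, 2)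

def Spec_procced (inf : List (List Int)) (success : Int) (fail1 : Int) (fail2 : Int) (out : Int) : Prop := out = procced_alt inf success fail1 fail2
instance (inf : List (List Int)) (success : Int) (fail1 : Int) (fail2 : Int) (out : Int) : Decidable (Spec_procced inf success fail1 fail2 out) := by unfold Spec_procced; infer_instance

-- ===== CLAIM (what is proved, stated in full; the proofs are below) =====
def Claim_equal_procced : Prop := ∀ (inf : List (List Int)) (success : Int) (fail1 : Int) (fail2 : Int), Dom_procced inf success fail1 fail2 → Pre_procced inf success fail1 fail2 → Spec_procced inf success fail1 fail2 (procced inf success fail1 fail2)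

-- ===== LEMMAS AND PROOFS =====

-- proof-side bridge: A's greedy loop, joined over one sorted list (used only in the proof)
def greedyLoop : List Int → Int → Int → Int
  | [], _, nas => nas
  | t :: ts, amy, nas => if amy + t ≤ 0 then nas else greedyLoop ts (amy + t) (nas + 1)

-- A's first loop counts and sums the positive totals and collects the rest in order
lemma foldA_char (f : List Int → Int) (l : List (List Int)) (nas amy : Int) (fm : List Int) :
    l.foldl (fun (st : Int × Int × List Int) sechme =>
        if f sechme > 0 then (st.1 + 1, st.2.1 + f sechme, st.2.2)
        else (st.1, st.2.1, st.2.2 ++ [f sechme]))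
      (nas, amy, fm)
    = (nas + (((l.map f).filter (fun t => decide (0 < t))).length : Int),
       amy + ((l.map f).filter (fun t => decide (0 < t))).sum,
       fm ++ (l.map f).filter (fun t => !decide (0 < t))) := by
  induction l generalizing nas amy fm with
  | nil => simp
  | cons r rs ih =>
    by_cases h : 0 < f r
    · simp only [List.foldl_cons, List.map_cons, List.filter_cons, h, decide_true,
        Bool.not_true, ih]
      refine Prod.ext ?_ (Prod.ext ?_ ?_) <;> simp <;> ring
    · simp only [List.foldl_cons, List.map_cons, List.filter_cons, decide_eq_true_eq, h,
        if_false, Bool.not_eq_true', decide_eq_false_iff_not, ih]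
      simp [List.append_assoc]

-- descending sort splits into the sorted positives followed by the sorted non-positives
lemma sorted_split (l : List Int) :
    PySem.List.sorted l (fun x => x) true
    = PySem.List.sorted (l.filter (fun t => decide (0 < t))) (fun x => x) true
      ++ PySem.List.sorted (l.filter (fun t => !decide (0 < t))) (fun x => x) true := by
  refine List.Perm.eq_of_pairwise (le := fun a b : Int => b ≤ a)
    (fun a b _ _ hab hba => le_antisymm hba hab) ?_ ?_ ?_
  · exact PySem.List.sorted_pairwise_rev _ _
  · rw [List.pairwise_append]
    refine ⟨PySem.List.sorted_pairwise_rev _ _, PySem.List.sorted_pairwise_rev _ _, ?_⟩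
    intro a ha b hb
    have ha' : 0 < a := by
      have := (PySem.List.mem_sorted _ _ _ _).1 ha
      simpa using (List.mem_filter.1 this).2
    have hb' : ¬ 0 < b := by
      have := (PySem.List.mem_sorted _ _ _ _).1 hb
      simpa using (List.mem_filter.1 this).2
    omega
  · refine (PySem.List.sorted_perm _ _ _).trans ?_
    refine ((List.filter_append_perm (fun t => decide (0 < t)) l).symm).trans ?_
    exact List.Perm.append (PySem.List.sorted_perm _ _ _).symm (PySem.List.sorted_perm _ _ _).symm

-- the greedy loop never breaks while consuming positive totals
lemma greedy_pos (pre rest : List Int) (amy nas : Int)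
    (hpre : ∀ t ∈ pre, 0 < t) (hamy : 0 ≤ amy) :
    greedyLoop (pre ++ rest) amy nas = greedyLoop rest (amy + pre.sum) (nas + pre.length) := by
  induction pre generalizing amy nas with
  | nil => simp
  | cons t ts ih =>
    have ht : 0 < t := hpre t (by simp)
    simp only [List.cons_append, greedyLoop]
    rw [if_neg (by omega), ih _ _ (fun x hx => hpre x (by simp [hx])) (by omega)]
    congr 1
    · simp [List.sum_cons]; ring
    · simp [List.length_cons]; ring

lemma greedy_eq_loop2 (ms : List Int) (amy nas : Int) :
    greedyLoop ms amy nas = (proccedLoop2 ms amy nas).2 := by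
  induction ms generalizing amy nas with
  | nil => rfl
  | cons m ms ih =>
    simp only [greedyLoop, proccedLoop2]
    split_ifs <;> simp [ih]

-- once the running sum is non-positive, a non-positive tail keeps every prefix sum non-positive
lemma count_nonpos (l : List Int) (s : Int) (hs : s ≤ 0) (hl : ∀ t ∈ l, t ≤ 0) :
    ((prefixSums l s).filter (fun p => decide (0 < p))).length = 0 := by
  induction l generalizing s with
  | nil => simp [prefixSums]
  | cons t ts ih =>
    have ht : t ≤ 0 := hl t (by simp)
    simp only [prefixSums, List.filter_cons]
    rw [if_neg (by simp; omega)]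
    exact ih (s + t) (by omega) (fun x hx => hl x (by simp [hx]))

-- on a descending list the greedy count equals the number of positive prefix sums
lemma greedy_eq_count (l : List Int) (amy nas : Int)
    (hsort : l.Pairwise (fun a b : Int => b ≤ a)) (hamy : 0 ≤ amy) :
    greedyLoop l amy nas = nas + (((prefixSums l amy).filter (fun p => decide (0 < p))).length : Int) := by
  induction l generalizing amy nas with
  | nil => simp [greedyLoop, prefixSums]
  | cons t ts ih =>
    rcases List.pairwise_cons.1 hsort with ⟨hhead, htail⟩
    by_cases h : amy + t ≤ 0
    · simp only [greedyLoop, if_pos h, prefixSums, List.filter_cons]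
      rw [if_neg (by simp; omega)]
      rw [count_nonpos ts (amy + t) h (fun x hx => le_trans (hhead x hx) (by omega))]
      simp
    · simp only [greedyLoop, if_neg h, prefixSums, List.filter_cons]
      rw [if_pos (by simp; omega)]
      rw [ih (amy + t) (nas + 1) htail (by omega)]
      simp only [List.length_cons]
      push_cast
      ring

lemma procced_main (f : List Int → Int) (inf : List (List Int)) :
    (let st := inf.foldl (fun (st : Int × Int × List Int) sechme =>
        if f sechme > 0 then (st.1 + 1, st.2.1 + f sechme, st.2.2)
        else (st.1, st.2.1, st.2.2 ++ [f sechme])) (0, 0, ([] : List Int))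
     let fm := PySem.List.sorted st.2.2 (fun x => x) true
     let r := proccedLoop2 fm st.2.1 st.1
     if r.2 = 0 then -1 else r.2)
    = (let totals := PySem.List.sorted (inf.map f) (fun x => x) true
       let nas : Int := ((prefixSums totals 0).filter (fun p => decide (0 < p))).length
       if nas = 0 then -1 else nas) := by
  rw [foldA_char f inf 0 0 []]
  simp only [zero_add, List.nil_append]
  set totals : List Int := inf.map f with htotals
  set pos := totals.filter (fun t => decide (0 < t)) with hpos
  set np := totals.filter (fun t => !decide (0 < t)) with hnp
  rw [sorted_split totals, ← hpos, ← hnp]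
  set spos := PySem.List.sorted pos (fun x => x) true with hspos
  set snp := PySem.List.sorted np (fun x => x) true with hsnp
  have hmem : ∀ t ∈ spos, 0 < t := by
    intro t ht
    have := (PySem.List.mem_sorted _ _ _ _).1 ht
    simpa using (List.mem_filter.1 this).2
  have hsum : spos.sum = pos.sum := (PySem.List.sorted_perm _ _ _).sum_eq
  have hlen : spos.length = pos.length := by
    rw [hspos]; exact PySem.List.length_sorted _ _ _
  have hsorted : (spos ++ snp).Pairwise (fun a b : Int => b ≤ a) := by
    rw [hspos, hsnp, hpos, hnp, ← sorted_split totals]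
    exact PySem.List.sorted_pairwise_rev _ _
  have hcount := greedy_eq_count (spos ++ snp) 0 0 hsorted le_rfl
  rw [greedy_pos spos snp 0 0 hmem le_rfl, greedy_eq_loop2, hsum, hlen, zero_add, zero_add,
    zero_add] at hcount
  rw [← hcount]

-- ===== VERDICT (by name: the statement is the Claim_ definition above) =====
theorem procced_spec : Claim_equal_procced := by
  intro inf success fail1 fail2 _ _
  show _ = _
  exact procced_main (fun row => PySem.List.pyGetD row success 0 -
    PySem.List.pyGetD row fail1 0 - PySem.List.pyGetD row fail2 0) inf
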